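-- pv_equiv track=rewrite | github.com/anders-ahsman/advent-of-code | 2020/day17/main.py | neighbours2
-- ===== SOURCE A (Python) =====
-- def neighbours2(state, pos):
--     count = 0
--     x, y, z, w = pos
--     for dw in (-1, 0, 1):
--         for dz in (-1, 0, 1):
--             for dy in (-1, 0, 1):
--                 for dx in (-1, 0, 1):
--                     if dz == dy == dx == dw == 0:
--                         continue
--                     npos = (x + dx, y + dy, z + dz, w + dw)
--                     if npos in state and state[npos] == '#':
--                         count += 1
--     return count
-- ===== SOURCE B (Python) =====
-- def neighbours2(state, pos):
--     x, y, z, w = pos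
--     centre = (x, y, z, w)
--     count = 0
--     for cell, value in state.items():
--         if value == '#' and cell != centre and len(cell) == 4 and all(abs(c - q) <= 1 for c, q in zip(cell, centre)):
--             count += 1
--     return count
-- ===== Notes on version B (the rewrite author's own statement) =====
-- stated objective: alternative
-- what changed: Instead of enumerating the fixed 81-offset 4D cube and looking each candidate up in the dict, B makes one pass over state.items() and counts active cells at Chebyshev distance 1 from pos.
import Mathlib
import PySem

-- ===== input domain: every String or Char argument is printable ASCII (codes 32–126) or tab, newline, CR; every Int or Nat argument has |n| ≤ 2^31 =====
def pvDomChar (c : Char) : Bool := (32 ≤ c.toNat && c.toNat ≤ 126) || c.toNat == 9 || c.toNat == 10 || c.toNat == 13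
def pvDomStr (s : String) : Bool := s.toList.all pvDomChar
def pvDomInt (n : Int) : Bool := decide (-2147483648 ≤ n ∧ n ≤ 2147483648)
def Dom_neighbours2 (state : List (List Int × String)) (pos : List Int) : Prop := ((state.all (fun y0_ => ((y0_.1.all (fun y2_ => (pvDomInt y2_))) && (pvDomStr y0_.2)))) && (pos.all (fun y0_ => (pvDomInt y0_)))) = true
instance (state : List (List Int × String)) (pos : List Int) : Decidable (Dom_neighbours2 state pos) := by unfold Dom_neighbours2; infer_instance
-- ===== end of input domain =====

-- B makes one pass over state.items() counting active cells at Chebyshev distance 1 from pos,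
-- instead of enumerating the fixed 81-offset 4D cube and looking each candidate up in the dict.

-- ===== PORT A =====
def neighbours2 (state : List (List Int × String)) (pos : List Int) : Int :=
  -- `x, y, z, w = pos` (raises ValueError unless len(pos) = 4; excluded by Pre_)
  if pos.length = 4 then
    let x := pos.getD 0 0
    let y := pos.getD 1 0
    let z := pos.getD 2 0
    let w := pos.getD 3 0
    List.foldl (fun count dw =>
      List.foldl (fun count dz =>
        List.foldl (fun count dy =>
          List.foldl (fun count dx =>
            if dz = 0 ∧ dy = 0 ∧ dx = 0 ∧ dw = 0 then count
            else if (PySem.Dict.mk state).get? [x + dx, y + dy, z + dz, w + dw] = some "#" then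
              count + 1
            else count)
            count ([-1, 0, 1] : List Int))
          count ([-1, 0, 1] : List Int))
        count ([-1, 0, 1] : List Int))
      0 ([-1, 0, 1] : List Int)
  else 0

-- ===== PORT B =====
def neighbours2_alt (state : List (List Int × String)) (pos : List Int) : Int :=
  -- `x, y, z, w = pos` (raises ValueError unless len(pos) = 4; excluded by Pre_)
  if pos.length = 4 then
    let x := pos.getD 0 0
    let y := pos.getD 1 0
    let z := pos.getD 2 0
    let w := pos.getD 3 0
    List.foldl (fun count cv =>
      if cv.2 = "#" ∧ cv.1 ≠ [x, y, z, w] ∧ cv.1.length = 4 ∧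
          (cv.1.zip [x, y, z, w]).all (fun cq => decide (|cq.1 - cq.2| ≤ 1)) = true then
        count + 1
      else count) 0 state
  else 0

-- ===== PRECONDITION & SPEC =====
-- Pre_ excludes pos of length ≠ 4 (Python's `x, y, z, w = pos` raises ValueError there) and
-- duplicate keys in the association list (impossible in the Python dict this list represents).
def Pre_neighbours2 (state : List (List Int × String)) (pos : List Int) : Prop :=
  pos.length = 4 ∧ (state.map Prod.fst).Nodup
instance (state : List (List Int × String)) (pos : List Int) : Decidable (Pre_neighbours2 state pos) := by unfold Pre_neighbours2; infer_instance

def pvWitness_neighbours2 : (List (List Int × String)) × List Int :=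
  ([([0, 0, 0, 1], "#"), ([1, 1, 0, 0], "."), ([5, 0, 0, 0], "#")], [0, 0, 0, 0])

def Spec_neighbours2 (state : List (List Int × String)) (pos : List Int) (out : Int) : Prop := out = neighbours2_alt state pos
instance (state : List (List Int × String)) (pos : List Int) (out : Int) : Decidable (Spec_neighbours2 state pos out) := by unfold Spec_neighbours2; infer_instance

-- ===== CLAIM (what is proved, stated in full; the proofs are below) =====
def Claim_equal_neighbours2 : Prop := ∀ (state : List (List Int × String)) (pos : List Int), Dom_neighbours2 state pos → Pre_neighbours2 state pos → Spec_neighbours2 state pos (neighbours2 state pos)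

-- ===== LEMMAS AND PROOFS =====

def pvInd (p : Prop) [Decidable p] : Int := if p then 1 else 0

def pvOffs : List (Int × Int × Int × Int) :=
 ([-1, 0, 1] : List Int).flatMap fun dw => ([-1, 0, 1] : List Int).flatMap fun dz =>
   ([-1, 0, 1] : List Int).flatMap fun dy => ([-1, 0, 1] : List Int).map fun dx => (dw, dz, dy, dx)

-- A's per-offset summand, for pos = [x,y,z,w]
def pvT (state : List (List Int × String)) (x y z w : Int) (d : Int × Int × Int × Int) : Int :=
  pvInd (¬(d.2.1 = 0 ∧ d.2.2.1 = 0 ∧ d.2.2.2 = 0 ∧ d.1 = 0) ∧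
    (PySem.Dict.mk state).get? [x + d.2.2.2, y + d.2.2.1, z + d.2.1, w + d.1] = some "#")

-- B's per-entry summand
abbrev pvP (pos : List Int) (e : List Int × String) : Prop :=
  e.2 = "#" ∧ e.1 ≠ pos ∧ e.1.length = 4 ∧
    (e.1.zip pos).all (fun cq => decide (|cq.1 - cq.2| ≤ 1)) = true

lemma pv_foldl_shift {α : Type} (f : Int → α → Int) (g : α → Int)
    (h : ∀ c a, f c a = c + g a) (l : List α) (c : Int) :
    List.foldl f c l = c + (l.map g).sum := by
  rw [PySem.List.foldl_congr_mem l f (fun c a => c + g a) c (fun acc x _ => h acc x),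
    PySem.List.foldl_add]

lemma pv_sum_flatMap {α : Type} (l : List α) (f : α → List Int) :
    (l.flatMap f).sum = (l.map (fun a => (f a).sum)).sum := by
  rw [List.flatMap_def, List.sum_flatten, List.map_map]; rfl

lemma pv_A_sum (state : List (List Int × String)) (x y z w : Int) :
    neighbours2 state [x, y, z, w] = (pvOffs.map (pvT state x y z w)).sum := by
  have hx : ∀ dw dz dy (c : Int),
      List.foldl (fun count dx =>
        if dz = 0 ∧ dy = 0 ∧ dx = 0 ∧ dw = 0 then count
        else if (PySem.Dict.mk state).get? [x + dx, y + dy, z + dz, w + dw] = some "#" then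
          count + 1
        else count) c ([-1, 0, 1] : List Int)
      = c + (([-1, 0, 1] : List Int).map (fun dx => pvT state x y z w (dw, dz, dy, dx))).sum := by
    intro dw dz dy c
    refine pv_foldl_shift _ _ ?_ _ _
    intro c dx
    simp only [pvT, pvInd]
    split_ifs <;> simp_all
  have hy : ∀ dw dz (c : Int),
      List.foldl (fun count dy =>
        List.foldl (fun count dx =>
          if dz = 0 ∧ dy = 0 ∧ dx = 0 ∧ dw = 0 then count
          else if (PySem.Dict.mk state).get? [x + dx, y + dy, z + dz, w + dw] = some "#" then
            count + 1
          else count) count ([-1, 0, 1] : List Int)) c ([-1, 0, 1] : List Int)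
      = c + (([-1, 0, 1] : List Int).map (fun dy => (([-1, 0, 1] : List Int).map (fun dx => pvT state x y z w (dw, dz, dy, dx))).sum)).sum := by
    intro dw dz c
    exact pv_foldl_shift _ _ (fun c dy => hx dw dz dy c) _ _
  have hz : ∀ dw (c : Int),
      List.foldl (fun count dz =>
        List.foldl (fun count dy =>
          List.foldl (fun count dx =>
            if dz = 0 ∧ dy = 0 ∧ dx = 0 ∧ dw = 0 then count
            else if (PySem.Dict.mk state).get? [x + dx, y + dy, z + dz, w + dw] = some "#" then
              count + 1
            else count) count ([-1, 0, 1] : List Int)) count ([-1, 0, 1] : List Int)) c ([-1, 0, 1] : List Int)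
      = c + (([-1, 0, 1] : List Int).map (fun dz => (([-1, 0, 1] : List Int).map (fun dy => (([-1, 0, 1] : List Int).map (fun dx => pvT state x y z w (dw, dz, dy, dx))).sum)).sum)).sum := by
    intro dw c
    exact pv_foldl_shift _ _ (fun c dz => hy dw dz c) _ _
  simp only [neighbours2, List.length_cons, List.length_nil, List.getD_cons_zero,
    List.getD_cons_succ, if_pos]
  rw [pv_foldl_shift _ _ (fun c dw => hz dw c), zero_add]
  simp only [pvOffs, List.map_flatMap, pv_sum_flatMap, List.map_map]
  simp [Function.comp]

lemma pv_B_sum (state : List (List Int × String)) (x y z w : Int) :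
    neighbours2_alt state [x, y, z, w] = (state.map (fun e => pvInd (pvP [x, y, z, w] e))).sum := by
  simp only [neighbours2_alt, List.length_cons, List.length_nil, List.getD_cons_zero,
    List.getD_cons_succ, if_pos]
  rw [pv_foldl_shift _ (fun e => pvInd (pvP [x, y, z, w] e)) ?_ state 0, zero_add]
  intro c e
  simp only [pvP, pvInd]
  split_ifs <;> omega

lemma pv_lookup_sum (st : List (List Int × String)) (key : List Int)
    (hnd : (st.map Prod.fst).Nodup) :
    pvInd ((PySem.Dict.mk st).get? key = some "#")
      = (st.map (fun e => pvInd (e.1 = key ∧ e.2 = "#"))).sum := by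
  induction st with
  | nil => simp [pvInd, PySem.Dict.get?]
  | cons kv st ih =>
    obtain ⟨k, v⟩ := kv
    simp only [List.map_cons, List.nodup_cons] at hnd
    obtain ⟨hk, hnd'⟩ := hnd
    rw [List.map_cons, List.sum_cons, ← ih hnd']
    rw [PySem.Dict.get?_mk_cons]
    by_cases h : k = key
    · subst h
      simp only [beq_self_eq_true, if_true]
      have hz : pvInd ((PySem.Dict.mk st).get? k = some "#") = 0 := by
        have : (PySem.Dict.mk st).get? k = none := by
          apply (PySem.Dict.get?_eq_none_iff_not_mem_keys _ _).mpr
          simpa [PySem.Dict.keys] using hk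
        simp [pvInd, this]
      rw [hz]
      simp [pvInd]
    · have : (k == key) = false := by simp [h]
      rw [this]
      simp [pvInd, h]

lemma pv_sum_comm {α β : Type} (l1 : List α) (l2 : List β) (t : α → β → Int) :
    (l1.map (fun a => (l2.map (t a)).sum)).sum
      = (l2.map (fun b => (l1.map (fun a => t a b)).sum)).sum := by
  induction l1 with
  | nil => simp [List.map_const']
  | cons a l1 ih =>
    rw [List.map_cons, List.sum_cons, ih]
    rw [← PySem.List.sum_map_add_int]
    simp

lemma pv_sum_delta {α : Type} [DecidableEq α] (L : List α) (a0 : α) (C : Int)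
    (hnd : L.Nodup) :
    (L.map (fun a => if a = a0 then C else 0)).sum = if a0 ∈ L then C else 0 := by
  induction L with
  | nil => simp
  | cons a L ih =>
    simp only [List.nodup_cons] at hnd
    obtain ⟨ha, hnd'⟩ := hnd
    rw [List.map_cons, List.sum_cons, ih hnd']
    by_cases h : a = a0
    · subst h
      have : a ∉ L := ha
      simp [this]
    · have h' : ¬ a0 = a := fun hh => h hh.symm
      simp [h, h']

set_option maxHeartbeats 2000000 in
lemma pv_offs_nodup : pvOffs.Nodup := by decide

lemma pv_entry (x y z w : Int) (k : List Int) (v : String) :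
    (pvOffs.map (fun d => pvInd (¬(d.2.1 = 0 ∧ d.2.2.1 = 0 ∧ d.2.2.2 = 0 ∧ d.1 = 0) ∧
        k = [x + d.2.2.2, y + d.2.2.1, z + d.2.1, w + d.1] ∧ v = "#"))).sum
      = pvInd (pvP [x, y, z, w] (k, v)) := by
  by_cases hv : v = "#"
  · subst hv
    match k with
    | [] => simp [pvP, pvInd]
    | [a] => simp [pvP, pvInd]
    | [a, b] => simp [pvP, pvInd]
    | [a, b, c] => simp [pvP, pvInd]
    | a :: b :: c :: e :: f :: rest => simp [pvP, pvInd]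
    | [a, b, c, e] =>
      have hcong : ∀ d ∈ pvOffs,
          pvInd (¬(d.2.1 = 0 ∧ d.2.2.1 = 0 ∧ d.2.2.2 = 0 ∧ d.1 = 0) ∧
            ([a, b, c, e] : List Int) = [x + d.2.2.2, y + d.2.2.1, z + d.2.1, w + d.1] ∧ ("#" : String) = "#")
          = if d = (e - w, c - z, b - y, a - x) then
              pvInd (¬(c - z = 0 ∧ b - y = 0 ∧ a - x = 0 ∧ e - w = 0)) else 0 := by
        intro d _
        obtain ⟨dw, dz, dy, dx⟩ := d
        simp only [pvInd, Prod.mk.injEq]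
        split_ifs <;> simp_all
      rw [List.map_congr_left hcong, pv_sum_delta _ _ _ pv_offs_nodup]
      have hmem : ((e - w, c - z, b - y, a - x) : Int × Int × Int × Int) ∈ pvOffs ↔
          (e - w ∈ ([-1, 0, 1] : List Int) ∧ c - z ∈ ([-1, 0, 1] : List Int) ∧ b - y ∈ ([-1, 0, 1] : List Int) ∧ a - x ∈ ([-1, 0, 1] : List Int)) := by
        simp only [pvOffs, List.mem_flatMap, List.mem_map, Prod.mk.injEq]
        constructor
        · rintro ⟨dw, hdw, dz, hdz, dy, hdy, dx, hdx, h1, h2, h3, h4⟩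
          subst h1; subst h2; subst h3; subst h4
          exact ⟨hdw, hdz, hdy, hdx⟩
        · rintro ⟨h1, h2, h3, h4⟩
          exact ⟨_, h1, _, h2, _, h3, _, h4, rfl, rfl, rfl, rfl⟩
      simp only [pvP, pvInd]
      by_cases hm : ((e - w, c - z, b - y, a - x) : Int × Int × Int × Int) ∈ pvOffs
      · rw [if_pos hm]
        have hc := hmem.mp hm
        simp only [List.mem_cons, List.not_mem_nil, or_false] at hc
        simp only [List.zip_cons_cons, List.zip_nil_right, List.all_cons, List.all_nil,
          ne_eq, List.cons.injEq, decide_eq_true_eq, Bool.and_eq_true, true_and, and_true,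
          abs_le, List.length_cons, List.length_nil]
        split_ifs <;> omega
      · rw [if_neg hm]
        simp only [List.zip_cons_cons, List.zip_nil_right, List.all_cons, List.all_nil,
          ne_eq, List.cons.injEq, decide_eq_true_eq, Bool.and_eq_true, true_and, and_true,
          abs_le, List.length_cons, List.length_nil]
        split_ifs with h
        · exact absurd (hmem.mpr
            ⟨by simp only [List.mem_cons, List.not_mem_nil, or_false]; omega,
             by simp only [List.mem_cons, List.not_mem_nil, or_false]; omega,
             by simp only [List.mem_cons, List.not_mem_nil, or_false]; omega,
             by simp only [List.mem_cons, List.not_mem_nil, or_false]; omega⟩) hm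
        · rfl
  · have h0 : ∀ d ∈ pvOffs,
        pvInd (¬(d.2.1 = 0 ∧ d.2.2.1 = 0 ∧ d.2.2.2 = 0 ∧ d.1 = 0) ∧
          k = [x + d.2.2.2, y + d.2.2.1, z + d.2.1, w + d.1] ∧ v = "#") = 0 := by
      intro d _; simp [pvInd, hv]
    rw [List.map_congr_left h0]
    simp [pvP, pvInd, hv]

-- ===== VERDICT (by name: the statement is the Claim_ definition above) =====
theorem neighbours2_spec : Claim_equal_neighbours2 := by
  intro state pos _ hpre
  obtain ⟨hlen, hnd⟩ := hpre
  obtain ⟨x, y, z, w, rfl⟩ : ∃ x y z w, pos = [x, y, z, w] := by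
    match pos, hlen with
    | [x, y, z, w], _ => exact ⟨x, y, z, w, rfl⟩
  show neighbours2 state [x, y, z, w] = neighbours2_alt state [x, y, z, w]
  rw [pv_A_sum, pv_B_sum]
  have step1 : ∀ d ∈ pvOffs, pvT state x y z w d
      = (state.map (fun e => pvInd (¬(d.2.1 = 0 ∧ d.2.2.1 = 0 ∧ d.2.2.2 = 0 ∧ d.1 = 0) ∧
          e.1 = [x + d.2.2.2, y + d.2.2.1, z + d.2.1, w + d.1] ∧ e.2 = "#"))).sum := by
    intro d _
    by_cases hs : (d.2.1 = 0 ∧ d.2.2.1 = 0 ∧ d.2.2.2 = 0 ∧ d.1 = 0)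
    · have : ∀ e ∈ state, pvInd (¬(d.2.1 = 0 ∧ d.2.2.1 = 0 ∧ d.2.2.2 = 0 ∧ d.1 = 0) ∧
          e.1 = [x + d.2.2.2, y + d.2.2.1, z + d.2.1, w + d.1] ∧ e.2 = "#") = 0 := by
        intro e _; simp [pvInd, hs]
      rw [List.map_congr_left this]
      simp [pvT, pvInd, hs]
    · have hT : pvT state x y z w d
          = pvInd ((PySem.Dict.mk state).get? [x + d.2.2.2, y + d.2.2.1, z + d.2.1, w + d.1] = some "#") := by
        simp [pvT, pvInd, hs]
      rw [hT, pv_lookup_sum _ _ hnd]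
      refine congrArg _ (List.map_congr_left ?_)
      intro e _
      simp [pvInd, hs]
  rw [List.map_congr_left step1, pv_sum_comm]
  refine congrArg _ (List.map_congr_left ?_)
  intro e _
  rw [pv_entry x y z w e.1 e.2]
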